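-- pv_equiv track=rewrite | github.com/Pratyaksh27/Python-DS-Interview | Recursion/factorial_with_intermediate_results.py | factorial_with_intermediate_results
-- ===== SOURCE A (Python) =====
-- def factorial_with_intermediate_results(n):
--     if n==0 or n==1:
--         return ([1])
--     else:
--         ret_list = factorial_with_intermediate_results(n-1)
--         last_val = n * ret_list[-1]
--         ret_list.append(last_val)
--         return ret_list
-- ===== SOURCE B (Python) =====
-- def factorial_with_intermediate_results(n):
--     if n < 0:
--         raise ValueError("n must be a nonnegative integer")
--     out = [1]
--     prod = 1
--     i = 2
--     while i <= n:
--         prod *= i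
--         out.append(prod)
--         i += 1
--     return out
-- ===== Notes on version B (the rewrite author's own statement) =====
-- stated objective: alternative
-- what changed: Replaces the n-deep recursion that reads the list's last element with a flat while loop carrying a scalar running-product accumulator, so the list is append-only and never indexed; negative n is rejected by explicit input validation.
import Mathlib
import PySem

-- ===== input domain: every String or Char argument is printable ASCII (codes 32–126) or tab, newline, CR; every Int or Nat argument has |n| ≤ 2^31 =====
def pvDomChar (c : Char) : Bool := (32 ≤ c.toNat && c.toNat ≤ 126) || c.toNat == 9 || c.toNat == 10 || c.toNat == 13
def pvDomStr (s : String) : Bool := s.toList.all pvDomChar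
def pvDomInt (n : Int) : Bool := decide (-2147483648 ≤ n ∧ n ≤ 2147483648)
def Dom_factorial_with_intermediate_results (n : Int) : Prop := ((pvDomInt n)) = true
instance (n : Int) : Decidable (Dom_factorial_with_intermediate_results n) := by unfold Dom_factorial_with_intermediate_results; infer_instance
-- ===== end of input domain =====

-- B replaces A's recursion (which rereads the list's last element) by a flat while loop with a
-- scalar running-product accumulator; same return value on every n where A returns.
-- ===== PORT A =====
-- ret_list[-1] : pyGet? returns some on the nonempty lists A builds; .getD 0 only discharges the Option.
def factorial_with_intermediate_results (n : Int) : List Int :=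
  if n = 0 ∨ n = 1 then [1]
  else if _h : 0 < n then
    let ret := factorial_with_intermediate_results (n - 1)
    ret ++ [n * (PySem.List.pyGet? ret (-1)).getD 0]
  else []  -- unreachable inside Pre_: Python A recurses forever (RecursionError) for n < 0
termination_by n.toNat
decreasing_by omega

-- ===== PORT B =====
-- the while loop: state (i, prod, out); runs while i ≤ n
def fwirAltLoop (n i prod : Int) (out : List Int) : List Int :=
  if _ : i ≤ n then fwirAltLoop n (i + 1) (prod * i) (out ++ [prod * i])
  else out
termination_by (n + 1 - i).toNat
decreasing_by omega

def factorial_with_intermediate_results_alt (n : Int) : List Int :=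
  if n < 0 then []  -- B raises ValueError here, outside Pre_
  else fwirAltLoop n 2 1 [1]

-- ===== PRECONDITION & SPEC =====
-- Pre_ excludes exactly n < 0, where Python A raises RecursionError (no base case is reached).
def Pre_factorial_with_intermediate_results (n : Int) : Prop := 0 ≤ n
instance (n : Int) : Decidable (Pre_factorial_with_intermediate_results n) := by
  unfold Pre_factorial_with_intermediate_results; infer_instance
def pvWitness_factorial_with_intermediate_results : Int := (5)
def Spec_factorial_with_intermediate_results (n : Int) (out : List Int) : Prop := out = factorial_with_intermediate_results_alt n
instance (n : Int) (out : List Int) : Decidable (Spec_factorial_with_intermediate_results n out) := by unfold Spec_factorial_with_intermediate_results; infer_instance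

-- ===== CLAIM (what is proved, stated in full; the proofs are below) =====
def Claim_equal_factorial_with_intermediate_results : Prop := ∀ (n : Int), Dom_factorial_with_intermediate_results n → Pre_factorial_with_intermediate_results n → Spec_factorial_with_intermediate_results n (factorial_with_intermediate_results n)

-- ===== LEMMAS AND PROOFS =====

-- A's last element is the factorial of n
theorem A_last (n : Int) (hn : 0 ≤ n) :
    (PySem.List.pyGet? (factorial_with_intermediate_results n) (-1)).getD 0 = ((n.toNat).factorial : Int) := by
  induction hk : n.toNat using Nat.strong_induction_on generalizing n with
  | _ k ih =>
    by_cases hb : n = 0 ∨ n = 1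
    · rw [factorial_with_intermediate_results, if_pos hb]
      rcases hb with h | h <;> subst h <;> subst hk <;> simp [PySem.List.pyGet?_neg_one]
    · have h2 : 2 ≤ n := by omega
      rw [factorial_with_intermediate_results, if_neg hb, dif_pos (by omega : (0:Int) < n)]
      simp only [PySem.List.pyGet?_neg_one_append_singleton, Option.getD_some]
      rw [ih (n - 1).toNat (by omega) (n - 1) (by omega) rfl]
      have : n.toNat = (n - 1).toNat + 1 := by omega
      rw [hk.symm, this, Nat.factorial_succ]
      push_cast
      have : ((n - 1).toNat : Int) + 1 = n := by omega
      rw [this]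

-- loop invariant: out = A (i-1), prod = (i-1)!  ⇒  the loop finishes with A n
theorem loop_invariant (n : Int) : ∀ (k : Nat) (i prod : Int) (out : List Int),
    (n + 1 - i).toNat = k → 2 ≤ i → i ≤ n + 1 →
    prod = (((i - 1).toNat).factorial : Int) → out = factorial_with_intermediate_results (i - 1) →
    fwirAltLoop n i prod out = factorial_with_intermediate_results n := by
  intro k
  induction k using Nat.strong_induction_on with
  | _ k ih =>
    intro i prod out hk h2 hle hprod hout
    rw [fwirAltLoop]
    by_cases hcond : i ≤ n
    · rw [dif_pos hcond]
      refine ih (n + 1 - (i + 1)).toNat (by omega) (i + 1) _ _ rfl (by omega) (by omega) ?_ ?_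
      · have : ((i + 1 - 1).toNat) = (i - 1).toNat + 1 := by omega
        rw [this, Nat.factorial_succ, hprod]
        push_cast
        have : ((i - 1).toNat : Int) + 1 = i := by omega
        rw [this]; ring
      · have hA : factorial_with_intermediate_results i =
            factorial_with_intermediate_results (i - 1) ++
              [i * (PySem.List.pyGet? (factorial_with_intermediate_results (i - 1)) (-1)).getD 0] := by
          rw [factorial_with_intermediate_results, if_neg (by omega), dif_pos (by omega : (0:Int) < i)]
        have hlast := A_last (i - 1) (by omega)
        have : (i + 1 - 1) = i := by omega
        rw [this, hA, hlast, hout, hprod]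
        congr 2
        ring
    · rw [dif_neg hcond]
      have : i = n + 1 := by omega
      rw [hout, this]
      norm_num

-- ===== VERDICT (by name: the statement is the Claim_ definition above) =====
theorem factorial_with_intermediate_results_spec : Claim_equal_factorial_with_intermediate_results := by
  intro n _ hpre
  unfold Pre_factorial_with_intermediate_results at hpre
  show factorial_with_intermediate_results n = factorial_with_intermediate_results_alt n
  unfold factorial_with_intermediate_results_alt
  rw [if_neg (by omega)]
  by_cases hb : n = 0 ∨ n = 1
  · rw [factorial_with_intermediate_results, if_pos hb, fwirAltLoop, dif_neg (by omega)]
  · exact (loop_invariant n (n + 1 - 2).toNat 2 1 [1] rfl (by omega) (by omega)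
      (by norm_num) (by rw [factorial_with_intermediate_results]; simp)).symm
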